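-- pv_equiv track=rewrite | github.com/FengyuanLiu1101/hri-dinebot | agent_a/simple_agent.py | _pick_menu_sub
-- ===== SOURCE A (Python) =====
-- def _pick_menu_sub(query_lower: str) -> str:
--     if "appetizer" in query_lower or "starter" in query_lower:
--         return "appetizers"
--     if "main" in query_lower or "entree" in query_lower or "course" in query_lower:
--         return "mains"
--     if "dessert" in query_lower or "sweet" in query_lower:
--         return "desserts"
--     if any(kw in query_lower for kw in ("drink", "beverage", "wine", "coffee", "tea")):
--         return "beverages"
--     return "default"
-- ===== SOURCE B (Python) =====
-- _KW_PRIORITY = {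
--     "appetizer": 0, "starter": 0,
--     "main": 1, "entree": 1, "course": 1,
--     "dessert": 2, "sweet": 2,
--     "drink": 3, "beverage": 3, "wine": 3, "coffee": 3, "tea": 3,
-- }
-- _LABELS = ["appetizers", "mains", "desserts", "beverages", "default"]
--
-- def _pick_menu_sub(query_lower: str) -> str:
--     best = 4
--     for kw, pri in _KW_PRIORITY.items():
--         if pri < best and kw in query_lower:
--             best = pri
--     return _LABELS[best]
-- ===== Notes on version B (the rewrite author's own statement) =====
-- stated objective: alternative
-- what changed: B replaces A's prioritized if-chain (early return on first matching category) with a single accumulator pass over a flat keyword-to-priority map that keeps the minimum matching priority, then indexes a label array with it.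
import Mathlib
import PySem

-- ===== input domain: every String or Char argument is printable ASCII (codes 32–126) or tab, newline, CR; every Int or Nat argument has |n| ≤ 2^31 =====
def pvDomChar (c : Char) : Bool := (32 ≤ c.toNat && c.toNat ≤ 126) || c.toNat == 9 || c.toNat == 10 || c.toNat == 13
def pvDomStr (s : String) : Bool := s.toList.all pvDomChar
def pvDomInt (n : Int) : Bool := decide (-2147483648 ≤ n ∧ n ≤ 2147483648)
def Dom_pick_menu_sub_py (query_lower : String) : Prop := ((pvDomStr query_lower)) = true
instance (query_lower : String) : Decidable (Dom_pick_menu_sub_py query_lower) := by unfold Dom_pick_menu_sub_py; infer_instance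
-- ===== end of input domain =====

-- B replaces A's prioritized if-chain with a min-priority accumulator pass over a flat
-- keyword→priority map, then indexes a label array (alternative decomposition, same cost).

-- ===== PORT A =====
def pick_menu_sub_py (query_lower : String) : String :=
  if PySem.Str.isIn "appetizer" query_lower || PySem.Str.isIn "starter" query_lower then
    "appetizers"
  else if PySem.Str.isIn "main" query_lower || PySem.Str.isIn "entree" query_lower
      || PySem.Str.isIn "course" query_lower then
    "mains"
  else if PySem.Str.isIn "dessert" query_lower || PySem.Str.isIn "sweet" query_lower then
    "desserts"
  else if ["drink", "beverage", "wine", "coffee", "tea"].any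
      (fun kw => PySem.Str.isIn kw query_lower) then
    "beverages"
  else
    "default"

-- ===== PORT B =====
def pvKwPriority : List (String × Nat) :=
  [("appetizer", 0), ("starter", 0), ("main", 1), ("entree", 1), ("course", 1), ("dessert", 2), ("sweet", 2), ("drink", 3), ("beverage", 3), ("wine", 3), ("coffee", 3), ("tea", 3)]

def pvLabels : List String := ["appetizers", "mains", "desserts", "beverages", "default"]

-- the loop body of B: keep the smaller priority when the keyword matches
def pvStep (query_lower : String) (best : Nat) (kp : String × Nat) : Nat :=
  if kp.2 < best && PySem.Str.isIn kp.1 query_lower then kp.2 else best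

def pick_menu_sub_py_alt (query_lower : String) : String :=
  let best := pvKwPriority.foldl (pvStep query_lower) 4
  -- _LABELS[best]: best is always 0..4, so plain in-range indexing (getD never uses its default)
  pvLabels.getD best "default"

-- ===== PRECONDITION & SPEC =====
def Spec_pick_menu_sub_py (query_lower : String) (out : String) : Prop := out = pick_menu_sub_py_alt query_lower
instance (query_lower : String) (out : String) : Decidable (Spec_pick_menu_sub_py query_lower out) := by unfold Spec_pick_menu_sub_py; infer_instance

-- ===== CLAIM (what is proved, stated in full; the proofs are below) =====
def Claim_equal_pick_menu_sub_py : Prop := ∀ (query_lower : String), Dom_pick_menu_sub_py query_lower → Spec_pick_menu_sub_py query_lower (pick_menu_sub_py query_lower)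

-- ===== LEMMAS AND PROOFS =====

-- once the accumulator is ≤ every remaining priority, the fold keeps it unchanged
theorem pvFold_ge (q : String) (b : Nat) (l : List (String × Nat))
    (h : ∀ kp ∈ l, ¬ kp.2 < b) :
    List.foldl (pvStep q) b l = b := by
  induction l with
  | nil => rfl
  | cons kp t ih =>
    have hb : ¬ kp.2 < b := h kp (by simp)
    rw [List.foldl_cons, show pvStep q b kp = b by unfold pvStep; simp [hb]]
    exact ih (fun x hx => h x (by simp [hx]))

-- closed characterization of B's fold
theorem pvFold_char (q : String) :
    List.foldl (pvStep q) 4 pvKwPriority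
      = (if PySem.Str.isIn "appetizer" q then 0 else if PySem.Str.isIn "starter" q then 0 else if PySem.Str.isIn "main" q then 1 else if PySem.Str.isIn "entree" q then 1 else if PySem.Str.isIn "course" q then 1 else if PySem.Str.isIn "dessert" q then 2 else if PySem.Str.isIn "sweet" q then 2 else if PySem.Str.isIn "drink" q then 3 else if PySem.Str.isIn "beverage" q then 3 else if PySem.Str.isIn "wine" q then 3 else if PySem.Str.isIn "coffee" q then 3 else if PySem.Str.isIn "tea" q then 3 else 4) := by
  simp only [pvKwPriority]
  cases hk0 : PySem.Str.isIn "appetizer" q with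
  | true =>
      rw [List.foldl_cons, show pvStep q 4 ("appetizer", 0) = 0 by unfold pvStep; rw [hk0]; decide,
          pvFold_ge q 0 [("starter", 0), ("main", 1), ("entree", 1), ("course", 1), ("dessert", 2), ("sweet", 2), ("drink", 3), ("beverage", 3), ("wine", 3), ("coffee", 3), ("tea", 3)] (by decide)]
      simp [*]
  | false =>
      rw [List.foldl_cons, show pvStep q 4 ("appetizer", 0) = 4 by unfold pvStep; rw [hk0]; decide]
      cases hk1 : PySem.Str.isIn "starter" q with
      | true =>
          rw [List.foldl_cons, show pvStep q 4 ("starter", 0) = 0 by unfold pvStep; rw [hk1]; decide,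
              pvFold_ge q 0 [("main", 1), ("entree", 1), ("course", 1), ("dessert", 2), ("sweet", 2), ("drink", 3), ("beverage", 3), ("wine", 3), ("coffee", 3), ("tea", 3)] (by decide)]
          simp [*]
      | false =>
          rw [List.foldl_cons, show pvStep q 4 ("starter", 0) = 4 by unfold pvStep; rw [hk1]; decide]
          cases hk2 : PySem.Str.isIn "main" q with
          | true =>
              rw [List.foldl_cons, show pvStep q 4 ("main", 1) = 1 by unfold pvStep; rw [hk2]; decide,
                  pvFold_ge q 1 [("entree", 1), ("course", 1), ("dessert", 2), ("sweet", 2), ("drink", 3), ("beverage", 3), ("wine", 3), ("coffee", 3), ("tea", 3)] (by decide)]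
              simp [*]
          | false =>
              rw [List.foldl_cons, show pvStep q 4 ("main", 1) = 4 by unfold pvStep; rw [hk2]; decide]
              cases hk3 : PySem.Str.isIn "entree" q with
              | true =>
                  rw [List.foldl_cons, show pvStep q 4 ("entree", 1) = 1 by unfold pvStep; rw [hk3]; decide,
                      pvFold_ge q 1 [("course", 1), ("dessert", 2), ("sweet", 2), ("drink", 3), ("beverage", 3), ("wine", 3), ("coffee", 3), ("tea", 3)] (by decide)]
                  simp [*]
              | false =>
                  rw [List.foldl_cons, show pvStep q 4 ("entree", 1) = 4 by unfold pvStep; rw [hk3]; decide]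
                  cases hk4 : PySem.Str.isIn "course" q with
                  | true =>
                      rw [List.foldl_cons, show pvStep q 4 ("course", 1) = 1 by unfold pvStep; rw [hk4]; decide,
                          pvFold_ge q 1 [("dessert", 2), ("sweet", 2), ("drink", 3), ("beverage", 3), ("wine", 3), ("coffee", 3), ("tea", 3)] (by decide)]
                      simp [*]
                  | false =>
                      rw [List.foldl_cons, show pvStep q 4 ("course", 1) = 4 by unfold pvStep; rw [hk4]; decide]
                      cases hk5 : PySem.Str.isIn "dessert" q with
                      | true =>
                          rw [List.foldl_cons, show pvStep q 4 ("dessert", 2) = 2 by unfold pvStep; rw [hk5]; decide,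
                              pvFold_ge q 2 [("sweet", 2), ("drink", 3), ("beverage", 3), ("wine", 3), ("coffee", 3), ("tea", 3)] (by decide)]
                          simp [*]
                      | false =>
                          rw [List.foldl_cons, show pvStep q 4 ("dessert", 2) = 4 by unfold pvStep; rw [hk5]; decide]
                          cases hk6 : PySem.Str.isIn "sweet" q with
                          | true =>
                              rw [List.foldl_cons, show pvStep q 4 ("sweet", 2) = 2 by unfold pvStep; rw [hk6]; decide,
                                  pvFold_ge q 2 [("drink", 3), ("beverage", 3), ("wine", 3), ("coffee", 3), ("tea", 3)] (by decide)]
                              simp [*]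
                          | false =>
                              rw [List.foldl_cons, show pvStep q 4 ("sweet", 2) = 4 by unfold pvStep; rw [hk6]; decide]
                              cases hk7 : PySem.Str.isIn "drink" q with
                              | true =>
                                  rw [List.foldl_cons, show pvStep q 4 ("drink", 3) = 3 by unfold pvStep; rw [hk7]; decide,
                                      pvFold_ge q 3 [("beverage", 3), ("wine", 3), ("coffee", 3), ("tea", 3)] (by decide)]
                                  simp [*]
                              | false =>
                                  rw [List.foldl_cons, show pvStep q 4 ("drink", 3) = 4 by unfold pvStep; rw [hk7]; decide]
                                  cases hk8 : PySem.Str.isIn "beverage" q with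
                                  | true =>
                                      rw [List.foldl_cons, show pvStep q 4 ("beverage", 3) = 3 by unfold pvStep; rw [hk8]; decide,
                                          pvFold_ge q 3 [("wine", 3), ("coffee", 3), ("tea", 3)] (by decide)]
                                      simp [*]
                                  | false =>
                                      rw [List.foldl_cons, show pvStep q 4 ("beverage", 3) = 4 by unfold pvStep; rw [hk8]; decide]
                                      cases hk9 : PySem.Str.isIn "wine" q with
                                      | true =>
                                          rw [List.foldl_cons, show pvStep q 4 ("wine", 3) = 3 by unfold pvStep; rw [hk9]; decide,
                                              pvFold_ge q 3 [("coffee", 3), ("tea", 3)] (by decide)]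
                                          simp [*]
                                      | false =>
                                          rw [List.foldl_cons, show pvStep q 4 ("wine", 3) = 4 by unfold pvStep; rw [hk9]; decide]
                                          cases hk10 : PySem.Str.isIn "coffee" q with
                                          | true =>
                                              rw [List.foldl_cons, show pvStep q 4 ("coffee", 3) = 3 by unfold pvStep; rw [hk10]; decide,
                                                  pvFold_ge q 3 [("tea", 3)] (by decide)]
                                              simp [*]
                                          | false =>
                                              rw [List.foldl_cons, show pvStep q 4 ("coffee", 3) = 4 by unfold pvStep; rw [hk10]; decide]
                                              cases hk11 : PySem.Str.isIn "tea" q with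
                                              | true =>
                                                  rw [List.foldl_cons, show pvStep q 4 ("tea", 3) = 3 by unfold pvStep; rw [hk11]; decide,
                                                      pvFold_ge q 3 [] (by decide)]
                                                  simp [*]
                                              | false =>
                                                  rw [List.foldl_cons, show pvStep q 4 ("tea", 3) = 4 by unfold pvStep; rw [hk11]; decide]
                                                  simp [*]

-- ===== VERDICT (by name: the statement is the Claim_ definition above) =====
theorem pick_menu_sub_py_spec : Claim_equal_pick_menu_sub_py := by
  intro q _
  unfold Spec_pick_menu_sub_py pick_menu_sub_py pick_menu_sub_py_alt
  rw [pvFold_char]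
  simp only [List.any_cons, List.any_nil, Bool.or_false]
  set a1 := PySem.Str.isIn "appetizer" q with h1
  set a2 := PySem.Str.isIn "starter" q with h2
  set a3 := PySem.Str.isIn "main" q with h3
  set a4 := PySem.Str.isIn "entree" q with h4
  set a5 := PySem.Str.isIn "course" q with h5
  set a6 := PySem.Str.isIn "dessert" q with h6
  set a7 := PySem.Str.isIn "sweet" q with h7
  set a8 := PySem.Str.isIn "drink" q with h8
  set a9 := PySem.Str.isIn "beverage" q with h9
  set a10 := PySem.Str.isIn "wine" q with h10
  set a11 := PySem.Str.isIn "coffee" q with h11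
  set a12 := PySem.Str.isIn "tea" q with h12
  clear h1 h2 h3 h4 h5 h6 h7 h8 h9 h10 h11 h12
  cases a1 <;> cases a2 <;> cases a3 <;> cases a4 <;> cases a5 <;> cases a6 <;>
    cases a7 <;> cases a8 <;> cases a9 <;> cases a10 <;> cases a11 <;> cases a12 <;>
    rfl
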